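-- pv_equiv track=rewrite | github.com/Jon-J/code_practice | algo/arrays/find_max_zeroes_flip_subarr.py | find_max_zeroes
-- ===== SOURCE A (Python) =====
-- def find_max_zeroes(array):
--     max_diff = 0
--     original_zero = 0
--
--     current_diff = 0
--
--     for elem in array:
--         if elem == 0:
--             original_zero += 1
--
--         value = 1 if elem else -1
--
--         current_diff = max(value, current_diff+value)
--         max_diff = max(max_diff, current_diff)
--
--     max_diff = max(0, max_diff)
--
--     return original_zero+max_diff
-- ===== SOURCE B (Python) =====
-- def find_max_zeroes(array):
--     zeros = 0
--     prefix = 0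
--     min_prefix = 0
--     max_diff = 0
--     for elem in array:
--         if elem == 0:
--             zeros += 1
--             prefix -= 1
--         else:
--             prefix += 1
--         if prefix - min_prefix > max_diff:
--             max_diff = prefix - min_prefix
--         if prefix < min_prefix:
--             min_prefix = prefix
--     return zeros + max_diff
-- ===== Notes on version B (the rewrite author's own statement) =====
-- stated objective: alternative
-- what changed: Replaces Kadane's max-of-suffix DP (current_diff = max(value, current_diff+value)) and the final max(0,.) floor with a prefix-sum plus running-minimum-prefix scan; the best flip gain is prefix - min_prefix, which is nonnegative by construction since min_prefix starts at 0 (empty prefix). Mechanism: replaces two builtin max() calls per element with plain comparisons and branch-local updates.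
import Mathlib
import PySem

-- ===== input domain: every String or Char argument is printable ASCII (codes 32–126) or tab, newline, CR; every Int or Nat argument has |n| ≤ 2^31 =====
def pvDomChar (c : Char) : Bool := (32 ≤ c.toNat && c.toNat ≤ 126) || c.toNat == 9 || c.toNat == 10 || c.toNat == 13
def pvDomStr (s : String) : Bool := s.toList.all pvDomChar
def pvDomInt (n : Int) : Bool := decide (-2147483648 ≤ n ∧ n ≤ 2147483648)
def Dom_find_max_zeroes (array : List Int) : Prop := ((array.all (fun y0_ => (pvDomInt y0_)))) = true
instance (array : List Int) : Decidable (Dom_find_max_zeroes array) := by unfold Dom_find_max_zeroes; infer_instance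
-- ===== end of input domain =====

-- B replaces A's Kadane-style DP (plus final max(0,·) floor) with a pref-sum /
-- running-minimum-pref scan; alternative decomposition, same O(n) cost.

-- ===== PORT A =====
-- state: (max_diff, original_zero, current_diff)
def find_max_zeroes_step (st : Int × Int × Int) (elem : Int) : Int × Int × Int :=
  let original_zero := if elem = 0 then st.2.1 + 1 else st.2.1
  let value : Int := if elem ≠ 0 then 1 else -1
  let current_diff := max value (st.2.2 + value)
  let max_diff := max st.1 current_diff
  (max_diff, original_zero, current_diff)

def find_max_zeroes (array : List Int) : Int :=
  let s := array.foldl find_max_zeroes_step (0, 0, 0)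
  s.2.1 + max 0 s.1

-- ===== PORT B =====
-- state: (zeros, pref, min_prefix, max_diff)
def find_max_zeroes_alt_step (st : Int × Int × Int × Int) (elem : Int) : Int × Int × Int × Int :=
  let zeros := if elem = 0 then st.1 + 1 else st.1
  let pref := if elem = 0 then st.2.1 - 1 else st.2.1 + 1
  let max_diff := if pref - st.2.2.1 > st.2.2.2 then pref - st.2.2.1 else st.2.2.2
  let min_prefix := if pref < st.2.2.1 then pref else st.2.2.1
  (zeros, pref, min_prefix, max_diff)

def find_max_zeroes_alt (array : List Int) : Int :=
  let s := array.foldl find_max_zeroes_alt_step (0, 0, 0, 0)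
  s.1 + s.2.2.2

-- ===== PRECONDITION & SPEC =====
def Spec_find_max_zeroes (array : List Int) (out : Int) : Prop := out = find_max_zeroes_alt array
instance (array : List Int) (out : Int) : Decidable (Spec_find_max_zeroes array out) := by unfold Spec_find_max_zeroes; infer_instance

-- ===== CLAIM (what is proved, stated in full; the proofs are below) =====
def Claim_equal_find_max_zeroes : Prop := ∀ (array : List Int), Dom_find_max_zeroes array → Spec_find_max_zeroes array (find_max_zeroes array)

-- ===== LEMMAS AND PROOFS =====

-- Invariant linking the two fold states: zeros tracks original_zero, B's max_diff
-- equals A's (A's is nonnegative so the final floor is a no-op), and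
-- pref - min_prefix = max 0 current_diff (best suffix sum, empty suffix allowed).
theorem fold_inv : ∀ (l : List Int) (md oz cd zeros pref minp mdB : Int),
    zeros = oz → mdB = md → 0 ≤ md → pref - minp = max 0 cd →
    (l.foldl find_max_zeroes_alt_step (zeros, pref, minp, mdB)).1
      + (l.foldl find_max_zeroes_alt_step (zeros, pref, minp, mdB)).2.2.2
    = (l.foldl find_max_zeroes_step (md, oz, cd)).2.1
      + max 0 (l.foldl find_max_zeroes_step (md, oz, cd)).1 := by
  intro l
  induction l with
  | nil => intro md oz cd zeros pref minp mdB h1 h2 h3 h4; simp [h1, h2]; omega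
  | cons a t ih =>
    intro md oz cd zeros pref minp mdB h1 h2 h3 h4
    simp only [List.foldl_cons]
    by_cases ha : a = 0 <;>
      · apply ih <;> simp [find_max_zeroes_alt_step, ha] <;> omega

-- ===== VERDICT (by name: the statement is the Claim_ definition above) =====
theorem find_max_zeroes_spec : Claim_equal_find_max_zeroes := by
  intro array _
  unfold Spec_find_max_zeroes find_max_zeroes find_max_zeroes_alt
  exact (fold_inv array 0 0 0 0 0 0 0 rfl rfl le_rfl (by simp)).symm
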